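-- pv_equiv track=rewrite | github.com/lhjht015-design/SecKnow | backend/src/secknow/text_processing/cleaners/pdf.py | _remove_first_line_matching
-- ===== SOURCE A (Python) =====
-- def _remove_first_line_matching(text: str, target: str) -> str:
--     """删除首次出现的、strip 后与 target 相等的整行（含该行换行）。"""
--     if not text.strip() or not target:
--         return text
--     lines = text.split("\n")
--     out: list[str] = []
--     removed = False
--     for line in lines:
--         if not removed and line.strip() == target:
--             removed = True
--             continue
--         out.append(line)
--     return "\n".join(out)
-- ===== SOURCE B (Python) =====
-- def _remove_first_line_matching(text: str, target: str) -> str: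
--     """Find the index of the first matching line, then excise it positionally."""
--     if not text.strip() or not target:
--         return text
--     lines = text.split("\n")
--     idx = next((i for i, line in enumerate(lines) if line.strip() == target), None)
--     if idx is not None:
--         del lines[idx]
--     return "\n".join(lines)
-- ===== Notes on version B (the rewrite author's own statement) =====
-- stated objective: simpler
-- what changed: Replaces the accumulate-while-filtering loop with a removed flag by a find-first-index pass followed by a positional deletion and rejoin (returning the input untouched when no line matches).
import Mathlib
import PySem

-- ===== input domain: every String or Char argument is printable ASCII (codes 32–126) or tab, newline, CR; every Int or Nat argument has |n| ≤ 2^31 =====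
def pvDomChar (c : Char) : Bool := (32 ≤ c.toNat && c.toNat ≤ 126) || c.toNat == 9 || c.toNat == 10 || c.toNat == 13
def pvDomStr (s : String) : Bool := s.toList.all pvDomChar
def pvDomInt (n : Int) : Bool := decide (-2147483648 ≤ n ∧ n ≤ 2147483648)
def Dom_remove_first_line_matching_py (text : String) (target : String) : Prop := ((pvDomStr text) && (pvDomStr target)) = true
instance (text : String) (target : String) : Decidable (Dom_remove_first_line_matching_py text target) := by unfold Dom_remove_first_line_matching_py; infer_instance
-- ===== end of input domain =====

-- B replaces A's accumulate-while-filtering loop (removed flag) by find-first-index + positional deletion + rejoin (objective: simpler).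

-- ===== PORT A =====
-- for line in lines: if not removed and line.strip() == target: removed = True; continue; out.append(line)
def remove_first_line_matching_py (text : String) (target : String) : String :=
  if PySem.Str.strip text == "" || target == "" then text
  else
    let lines := (PySem.Str.split? text "\n").getD []
    let r := lines.foldl
      (fun (st : List String × Bool) (line : String) =>
        if !st.2 && (PySem.Str.strip line == target) then (st.1, true)
        else (st.1 ++ [line], st.2))
      ([], false)
    PySem.Str.join "\n" r.1

-- ===== PORT B =====
def remove_first_line_matching_py_alt (text : String) (target : String) : String :=
  if PySem.Str.strip text == "" || target == "" then text
  else
    let lines := (PySem.Str.split? text "\n").getD []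
    let lines' :=
      match lines.findIdx? (fun line => PySem.Str.strip line == target) with
      | none => lines
      | some i => lines.take i ++ lines.drop (i + 1)
    PySem.Str.join "\n" lines'

-- ===== PRECONDITION & SPEC =====
def Spec_remove_first_line_matching_py (text : String) (target : String) (out : String) : Prop := out = remove_first_line_matching_py_alt text target
instance (text : String) (target : String) (out : String) : Decidable (Spec_remove_first_line_matching_py text target out) := by unfold Spec_remove_first_line_matching_py; infer_instance

-- ===== CLAIM (what is proved, stated in full; the proofs are below) =====
def Claim_equal_remove_first_line_matching_py : Prop := ∀ (text : String) (target : String), Dom_remove_first_line_matching_py text target → Spec_remove_first_line_matching_py text target (remove_first_line_matching_py text target)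

-- ===== LEMMAS AND PROOFS =====

-- once the line has been removed, A's loop just appends everything
theorem pvFoldTrue (target : String) (L acc : List String) :
    (L.foldl
      (fun (st : List String × Bool) (line : String) =>
        if !st.2 && (PySem.Str.strip line == target) then (st.1, true)
        else (st.1 ++ [line], st.2))
      (acc, true)).1 = acc ++ L := by
  induction L generalizing acc with
  | nil => simp
  | cons l ls ih =>
    rw [List.foldl_cons, if_neg (by simp)]
    rw [ih]; simp

-- while nothing has been removed, A's loop computes the excision at the first matching index
theorem pvFoldFalse (target : String) (L acc : List String) :
    (L.foldl
      (fun (st : List String × Bool) (line : String) =>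
        if !st.2 && (PySem.Str.strip line == target) then (st.1, true)
        else (st.1 ++ [line], st.2))
      (acc, false)).1 =
    acc ++ (match L.findIdx? (fun line => PySem.Str.strip line == target) with
            | none => L
            | some i => L.take i ++ L.drop (i + 1)) := by
  induction L generalizing acc with
  | nil => simp
  | cons l ls ih =>
    by_cases h : (PySem.Str.strip l == target) = true
    · rw [List.foldl_cons, if_pos (by simp [h]), pvFoldTrue]
      simp [List.findIdx?_cons, h]
    · rw [List.foldl_cons, if_neg (by simp [h]), ih]
      rw [List.findIdx?_cons]
      simp only [h, Bool.false_eq_true, if_false]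
      cases hf : ls.findIdx? (fun line => PySem.Str.strip line == target) with
      | none => simp
      | some i => simp [List.take_succ_cons, List.drop_succ_cons]

-- ===== VERDICT (by name: the statement is the Claim_ definition above) =====
theorem remove_first_line_matching_py_spec : Claim_equal_remove_first_line_matching_py := by
  intro text target _
  unfold Spec_remove_first_line_matching_py
  unfold remove_first_line_matching_py remove_first_line_matching_py_alt
  by_cases hg : (PySem.Str.strip text == "" || target == "") = true
  · rw [if_pos hg, if_pos hg]
  · rw [if_neg hg, if_neg hg]
    dsimp only
    rw [pvFoldFalse]
    simp
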